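-- pv_equiv track=rewrite | github.com/pypi-data/pypi-mirror-335 | packages/mcnpy/mcnpy-0.2.5-py3-none-any.whl/mcnpy/mctal/parse_mctal.py | separate_total_energy_bins
-- ===== SOURCE A (Python) =====
-- def separate_total_energy_bins(values, n_energy_bins, has_total_energy_bin):
--     """Separate the total energy bin values from the regular results array.
--
--     In MCNP MCTAL files with multiple dimensions, energy is the rightmost dimension
--     and varies fastest. For tallies with total energy bins, every nth value
--     (where n = n_energy_bins) is a total bin value.
--
--     Args:
--         values (list): The flat array of values (results or errors)
--         n_energy_bins (int): Number of energy bins including total bins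
--         has_total_energy_bin (bool): Whether the tally has total energy bins
--
--     Returns:
--         tuple: (regular_values, total_values) - values with totals removed, and the extracted totals
--     """
--     if not has_total_energy_bin or n_energy_bins <= 1:
--         return values, []
--
--     # For energy bins with a total, the number of regular bins is n_energy_bins - 1
--     n_regular_bins = n_energy_bins - 1
--
--     if n_regular_bins == 0:
--         # Special case: If there are no regular energy bins, all values are total bins
--         return [], values
--
--     # Initialize regular and total value lists
--     regular_values = []
--     total_values = []
--
--     # Extract values: in each group of n_energy_bins values, the last one is the total
--     for i in range(0, len(values), n_energy_bins):
--         # Add all but the last value to regular_values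
--         group_end = min(i + n_energy_bins, len(values))
--
--         if i + n_regular_bins <= len(values):
--             regular_values.extend(values[i:i + n_regular_bins])
--
--         # Add the total value if it exists in this group
--         if i + n_regular_bins < group_end:
--             total_values.append(values[i + n_regular_bins])
--
--     return regular_values, total_values
-- ===== SOURCE B (Python) =====
-- def separate_total_energy_bins(values, n_energy_bins, has_total_energy_bin):
--     """Element-wise re-implementation: classify each value by its index modulo
--     n_energy_bins instead of slicing group by group."""
--     if not has_total_energy_bin or n_energy_bins <= 1:
--         return values, []
--     n_regular_bins = n_energy_bins - 1
--     rem = len(values) % n_energy_bins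
--     cutoff = len(values) - rem if rem < n_regular_bins else len(values)
--     regular_values = [v for j, v in enumerate(values)
--                       if j < cutoff and j % n_energy_bins != n_regular_bins]
--     total_values = [v for j, v in enumerate(values)
--                     if j % n_energy_bins == n_regular_bins]
--     return regular_values, total_values
-- ===== Notes on version B (the rewrite author's own statement) =====
-- stated objective: idiomatic
-- what changed: Replaces A's group-by-group loop with block slicing by element-wise classification: two comprehensions pick each value by its index modulo n_energy_bins (totals at j % n == n-1, regulars at the other indices below a cutoff that drops the trailing partial group exactly as A does).
import Mathlib
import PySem

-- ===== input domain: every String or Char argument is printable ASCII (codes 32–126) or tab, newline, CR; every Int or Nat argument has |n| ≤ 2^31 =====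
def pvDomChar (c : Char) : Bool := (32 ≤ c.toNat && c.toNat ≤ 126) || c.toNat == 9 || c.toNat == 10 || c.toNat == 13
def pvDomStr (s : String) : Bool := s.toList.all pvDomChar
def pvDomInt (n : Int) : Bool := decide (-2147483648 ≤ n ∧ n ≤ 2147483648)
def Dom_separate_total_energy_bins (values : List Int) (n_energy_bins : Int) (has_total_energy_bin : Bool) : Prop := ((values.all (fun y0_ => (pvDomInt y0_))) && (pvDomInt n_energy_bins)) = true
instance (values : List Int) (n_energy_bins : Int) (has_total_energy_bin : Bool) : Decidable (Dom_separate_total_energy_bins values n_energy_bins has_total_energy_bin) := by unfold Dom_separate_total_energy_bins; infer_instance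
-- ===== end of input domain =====

-- ===== PORT A =====
-- B replaces A's group-by-group slicing loop with element-wise index-modulo classification (idiomatic, same cost).
def separate_total_energy_bins (values : List Int) (n_energy_bins : Int) (has_total_energy_bin : Bool) : List Int × List Int :=
  if has_total_energy_bin = false ∨ n_energy_bins ≤ 1 then (values, [])
  else
    let n_regular_bins := n_energy_bins - 1
    if n_regular_bins = 0 then ([], values)
    else
      (PySem.List.pyRange 0 (values.length : Int) n_energy_bins).foldl
        (fun (st : List Int × List Int) (i : Int) =>
          let group_end := min (i + n_energy_bins) (values.length : Int)
          let st1 := if i + n_regular_bins ≤ (values.length : Int)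
            then (st.1 ++ PySem.List.slice values (some i) (some (i + n_regular_bins)), st.2)
            else st
          if i + n_regular_bins < group_end
            then (st1.1, st1.2 ++ [PySem.List.pyGetD values (i + n_regular_bins) 0])
            else st1)
        ([], [])

-- ===== PORT B =====
def separate_total_energy_bins_alt (values : List Int) (n_energy_bins : Int) (has_total_energy_bin : Bool) : List Int × List Int :=
  if has_total_energy_bin = false ∨ n_energy_bins ≤ 1 then (values, [])
  else
    let n_regular_bins := n_energy_bins - 1
    let rem := PySem.Int.mod (values.length : Int) n_energy_bins
    let cutoff := if rem < n_regular_bins then (values.length : Int) - rem else (values.length : Int)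
    let regular_values := ((PySem.List.enumerate values 0).filter
        (fun p => decide (p.1 < cutoff) && !(PySem.Int.mod p.1 n_energy_bins == n_regular_bins))).map (·.2)
    let total_values := ((PySem.List.enumerate values 0).filter
        (fun p => PySem.Int.mod p.1 n_energy_bins == n_regular_bins)).map (·.2)
    (regular_values, total_values)

-- ===== PRECONDITION & SPEC =====
def Spec_separate_total_energy_bins (values : List Int) (n_energy_bins : Int) (has_total_energy_bin : Bool) (out : List Int × List Int) : Prop := out = separate_total_energy_bins_alt values n_energy_bins has_total_energy_bin
instance (values : List Int) (n_energy_bins : Int) (has_total_energy_bin : Bool) (out : List Int × List Int) : Decidable (Spec_separate_total_energy_bins values n_energy_bins has_total_energy_bin out) := by unfold Spec_separate_total_energy_bins; infer_instance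

-- ===== CLAIM (what is proved, stated in full; the proofs are below) =====
def Claim_equal_separate_total_energy_bins : Prop := ∀ (values : List Int) (n_energy_bins : Int) (has_total_energy_bin : Bool), Dom_separate_total_energy_bins values n_energy_bins has_total_energy_bin → Spec_separate_total_energy_bins values n_energy_bins has_total_energy_bin (separate_total_energy_bins values n_energy_bins has_total_energy_bin)

-- ===== LEMMAS AND PROOFS =====

/-- Element-wise specification both ports are reduced to: `j` is the absolute index,
`k` the position inside the current group of `nr + 1` values. -/
def pvEsp (nr cutoff : Nat) : Nat → Nat → List Int → List Int × List Int
  | _, _, [] => ([], [])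
  | j, k, x :: xs =>
    let next := pvEsp nr cutoff (j + 1) (if k = nr then 0 else k + 1) xs
    (if j < cutoff ∧ ¬ k = nr then x :: next.1 else next.1,
     if k = nr then x :: next.2 else next.2)

lemma pvEsp_full (nr cutoff : Nat) : ∀ (c rest : List Int) (j k : Nat),
    k ≤ nr → k + c.length = nr + 1 → j + c.length ≤ cutoff →
    pvEsp nr cutoff j k (c ++ rest)
      = (c.take (c.length - 1) ++ (pvEsp nr cutoff (j + c.length) 0 rest).1,
         c.drop (c.length - 1) ++ (pvEsp nr cutoff (j + c.length) 0 rest).2) := by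
  intro c
  induction c with
  | nil => intro rest j k hk h1 h2; exfalso; simp at h1; omega
  | cons x c' ih =>
    intro rest j k hk h1 h2
    by_cases hc : c' = []
    · subst hc
      have hkr : k = nr := by simpa using h1
      simp [pvEsp, hkr]
    · have hlen : 1 ≤ c'.length := List.length_pos_iff.mpr hc
      have hkr : ¬ k = nr := by simp at h1 ⊢; omega
      have hjc : j < cutoff := by simp at h2; omega
      have := ih rest (j + 1) (k + 1) (by simp at h1 ⊢; omega) (by simp at h1 ⊢; omega)
        (by simp at h2 ⊢; omega)
      simp only [List.cons_append, pvEsp, this, hkr, if_neg, if_pos, hjc, and_true,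
        not_false_iff, List.length_cons]
      have h3 : c'.length + 1 - 1 = (c'.length - 1) + 1 := by omega
      rw [h3, List.take_succ_cons, List.drop_succ_cons]
      have h4 : j + (c'.length + 1) = j + 1 + c'.length := by omega
      rw [h4]
      have h5 : c'.length - 1 + 1 = c'.length := by omega
      simp

lemma pvEsp_tail_keep (nr cutoff : Nat) : ∀ (c : List Int) (j k : Nat),
    k + c.length ≤ nr → j + c.length ≤ cutoff →
    pvEsp nr cutoff j k c = (c, []) := by
  intro c
  induction c with
  | nil => intro j k _ _; rfl
  | cons x c' ih =>
    intro j k h1 h2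
    simp only [List.length_cons] at h1 h2
    have hkr : ¬ k = nr := by omega
    have hjc : j < cutoff := by omega
    simp [pvEsp, hkr, hjc, ih (j + 1) (k + 1) (by omega) (by omega)]

lemma pvEsp_tail_drop (nr cutoff : Nat) : ∀ (c : List Int) (j k : Nat),
    k + c.length ≤ nr → cutoff ≤ j →
    pvEsp nr cutoff j k c = ([], []) := by
  intro c
  induction c with
  | nil => intro j k _ _; rfl
  | cons x c' ih =>
    intro j k h1 h2
    simp only [List.length_cons] at h1
    have hkr : ¬ k = nr := by omega
    have hjc : ¬ j < cutoff := by omega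
    simp [pvEsp, hkr, hjc, ih (j + 1) (k + 1) (by omega) (by omega)]

lemma pvTake_drop_singleton : ∀ (s : List Int) (k : Nat), k < s.length →
    (s.take (k + 1)).drop k = [s.getD k 0] := by
  intro s
  induction s with
  | nil => intro k hk; simp at hk
  | cons x s' ih =>
    intro k hk
    cases k with
    | zero => simp
    | succ k' =>
      simp only [List.length_cons] at hk
      simpa using ih k' (by omega)

lemma pvMult_le_sub_mod (nn x len : Nat) (h0 : 0 < nn) (hd : nn ∣ x) (hx : x ≤ len) :
    x ≤ len - len % nn := by
  obtain ⟨a, rfl⟩ := hd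
  have hx' : a * nn ≤ len := by rw [Nat.mul_comm]; exact hx
  have h1 : a ≤ len / nn := (Nat.le_div_iff_mul_le h0).mpr hx'

  have h2 := Nat.div_add_mod len nn
  have h3 : nn * a ≤ nn * (len / nn) := Nat.mul_le_mul_left nn h1
  omega

/-- `range(a, b, s)` with positive step: peel the first element. -/
lemma pvPyRange_pos_cons {a b s : Int} (hs : 0 < s) (hab : a < b) :
    PySem.List.pyRange a b s = a :: PySem.List.pyRange (a + s) b s := by
  rw [PySem.List.pyRange_of_pos a b hs, PySem.List.pyRange_of_pos (a + s) b hs]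
  have key : (if a < b then ((b - a + s - 1) / s).toNat else 0)
      = (if a + s < b then ((b - (a + s) + s - 1) / s).toNat else 0) + 1 := by
    have hd : 0 ≤ (b - a - 1) / s := Int.ediv_nonneg (by omega) (le_of_lt hs)
    have e1 : b - a + s - 1 = (b - a - 1) + 1 * s := by ring
    rw [if_pos hab, e1, Int.add_mul_ediv_right _ _ (ne_of_gt hs)]
    by_cases h : a + s < b
    · rw [if_pos h]
      have e2 : b - (a + s) + s - 1 = b - a - 1 := by ring
      rw [e2]
      omega
    · rw [if_neg h]
      have : (b - a - 1) / s = 0 := Int.ediv_eq_zero_of_lt (by omega) (by omega)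
      omega
  rw [key, List.range_succ_eq_map]
  simp only [List.map_map, List.map_cons, Function.comp_def]
  congr 1
  · push_cast; ring
  · refine List.map_congr_left ?_
    intro k _
    push_cast
    ring

lemma pvPyRange_pos_nil {a b s : Int} (hs : 0 < s) (hab : b ≤ a) :
    PySem.List.pyRange a b s = [] := by
  rw [PySem.List.pyRange_of_pos a b hs, if_neg (not_lt.mpr hab)]
  simp

/-- B's two filtered comprehensions compute `pvEsp`. -/
lemma pvB_eq_esp (nn nr cutoff : Nat) (hnr : nr + 1 = nn) (hnn : 2 ≤ nn) :
    ∀ (s : List Int) (j : Nat),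
    ((((PySem.List.enumerate s (j : Int)).filter
        (fun p => decide (p.1 < (cutoff : Int)) && !(PySem.Int.mod p.1 (nn : Int) == (nr : Int)))).map (·.2)),
     (((PySem.List.enumerate s (j : Int)).filter
        (fun p => PySem.Int.mod p.1 (nn : Int) == (nr : Int))).map (·.2)))
      = pvEsp nr cutoff j (j % nn) s := by
  intro s
  induction s with
  | nil => intro j; simp [pvEsp, PySem.List.enumerate_nil]
  | cons x xs ih =>
    intro j
    rw [PySem.List.enumerate_cons]
    have hmod : PySem.Int.mod (j : Int) (nn : Int) = ((j % nn : Nat) : Int) :=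
      PySem.Int.mod_natCast j nn
    by_cases hk : j % nn = nr
    · have hnext : (j + 1) % nn = 0 := by
        have h1 : (j + 1) % nn = (j % nn + 1 % nn) % nn := Nat.add_mod j 1 nn
        have h2 : 1 % nn = 1 := Nat.mod_eq_of_lt (by omega)
        rw [h1, h2, hk, hnr, Nat.mod_self]
      have hpair := ih (j + 1)
      rw [hnext] at hpair
      have hp1 := congrArg Prod.fst hpair
      have hp2 := congrArg Prod.snd hpair
      simp only at hp1 hp2
      push_cast at hp1 hp2
      have hcond : ((j : Int) % (nn : Int)) = ((nr : Nat) : Int) := by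
        rw [← Int.natCast_mod]; exact_mod_cast hk
      simp [hmod, hk, pvEsp, hp1, hp2]
    · have hklt : j % nn < nr := by
        have := Nat.mod_lt j (show 0 < nn by omega)
        omega
      have hnext : (j + 1) % nn = j % nn + 1 := by
        have h1 : (j + 1) % nn = (j % nn + 1 % nn) % nn := Nat.add_mod j 1 nn
        have h2 : 1 % nn = 1 := Nat.mod_eq_of_lt (by omega)
        rw [h1, h2]
        exact Nat.mod_eq_of_lt (by omega)
      have hpair := ih (j + 1)
      rw [hnext] at hpair
      have hp1 := congrArg Prod.fst hpair
      have hp2 := congrArg Prod.snd hpair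
      simp only at hp1 hp2
      push_cast at hp1 hp2
      have hne : ¬ ((j % nn : Nat) : Int) = ((nr : Nat) : Int) := by
        exact_mod_cast hk
      have hcond : ¬ ((j : Int) % (nn : Int)) = ((nr : Nat) : Int) := by
        rw [← Int.natCast_mod]; exact_mod_cast hk
      by_cases hc : j < cutoff
      · simp [hmod, hcond, pvEsp, hk, hc, hp1, hp2]
      · simp [hmod, hcond, pvEsp, hk, hc, hp1, hp2]

/-- A's fold over `range(0, len, n)` computes `pvEsp`, one group per iteration. -/
lemma pvA_loop (values : List Int) (nn nr cutN : Nat) (hnr : nr + 1 = nn) (hnn : 2 ≤ nn)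
    (hcut : cutN = if values.length % nn < nr then values.length - values.length % nn else values.length) :
    ∀ (m aN : Nat) (R T : List Int), values.length - aN ≤ m → nn ∣ aN → aN ≤ values.length →
    (PySem.List.pyRange (aN : Int) (values.length : Int) (nn : Int)).foldl
        (fun (st : List Int × List Int) (i : Int) =>
          let group_end := min (i + (nn : Int)) (values.length : Int)
          let st1 := if i + ((nn : Int) - 1) ≤ (values.length : Int)
            then (st.1 ++ PySem.List.slice values (some i) (some (i + ((nn : Int) - 1))), st.2)
            else st
          if i + ((nn : Int) - 1) < group_end
            then (st1.1, st1.2 ++ [PySem.List.pyGetD values (i + ((nn : Int) - 1)) 0])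
            else st1)
        (R, T)
      = (R ++ (pvEsp nr cutN aN 0 (values.drop aN)).1,
         T ++ (pvEsp nr cutN aN 0 (values.drop aN)).2) := by
  have h0nn : (0 : Int) < (nn : Int) := by exact_mod_cast (show 0 < nn by omega)
  intro m
  induction m with
  | zero =>
    intro aN R T hm hdvd hle
    have h1 : values.length ≤ aN := by omega
    rw [pvPyRange_pos_nil h0nn (by exact_mod_cast h1)]
    have h2 : values.drop aN = [] := List.drop_eq_nil_of_le h1
    simp [h2, pvEsp]
  | succ m ihm =>
    intro aN R T hm hdvd hle
    by_cases hend : values.length ≤ aN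
    · rw [pvPyRange_pos_nil h0nn (by exact_mod_cast hend)]
      have h2 : values.drop aN = [] := List.drop_eq_nil_of_le hend
      simp [h2, pvEsp]
    · rw [Nat.not_le] at hend
      have hs : (values.drop aN).length = values.length - aN := List.length_drop ..
      have hnrc : ((nn : Int) - 1) = ((nr : Nat) : Int) := by omega
      rw [pvPyRange_pos_cons h0nn (by exact_mod_cast hend), List.foldl_cons]
      have hplus : (aN : Int) + (nn : Int) = ((aN + nn : Nat) : Int) := by push_cast; ring
      have hcutlow : values.length - values.length % nn ≤ cutN := by
        rcases Nat.lt_or_ge (values.length % nn) nr with h | h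
        · rw [hcut, if_pos h]
        · rw [hcut, if_neg (by omega)]; omega
      by_cases hfull : nn ≤ values.length - aN
      · -- full group
        have hcond1 : (aN : Int) + ((nn : Int) - 1) ≤ (values.length : Int) := by
          omega
        have hcond2 : (aN : Int) + ((nn : Int) - 1)
            < min ((aN : Int) + (nn : Int)) (values.length : Int) := by
          refine lt_min_iff.mpr ⟨by omega, by omega⟩
        simp only [if_pos hcond1, if_pos hcond2]
        rw [hplus, ihm (aN + nn) _ _ (by omega) (by exact Nat.dvd_add hdvd dvd_rfl) (by omega)]
        -- evaluate slice and pyGetD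
        rw [hnrc]
        have hsl : PySem.List.slice values (some (aN : Int)) (some ((aN : Int) + ((nr : Nat) : Int)))
            = (values.drop aN).take nr := PySem.List.slice_natCast_add values aN nr
        have hget : PySem.List.pyGetD values ((aN : Int) + ((nr : Nat) : Int)) 0
            = (values.drop aN).getD nr 0 := by
          have : (aN : Int) + ((nr : Nat) : Int) = ((aN + nr : Nat) : Int) := by push_cast; ring
          rw [this, PySem.List.pyGetD_natCast]
          simp [List.getD_eq_getElem?_getD, List.getElem?_drop]
        -- expand pvEsp over one full group
        have hc : (values.drop aN).take nn ++ (values.drop aN).drop nn = values.drop aN :=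
          List.take_append_drop ..
        have hclen : ((values.drop aN).take nn).length = nn := by
          rw [List.length_take]; omega
        have hcutok : aN + nn ≤ cutN := by
          have hd2 : nn ∣ aN + nn := Nat.dvd_add hdvd dvd_rfl
          have := pvMult_le_sub_mod nn (aN + nn) values.length (by omega) hd2 (by omega)
          omega
        have hesp := pvEsp_full nr cutN ((values.drop aN).take nn) ((values.drop aN).drop nn)
          aN 0 (by omega) (by omega) (by omega)
        rw [hc] at hesp
        rw [hesp]
        have hdd : (values.drop aN).drop nn = values.drop (aN + nn) := by
          rw [List.drop_drop]
        have htt : ((values.drop aN).take nn).take (nn - 1) = (values.drop aN).take nr := by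
          rw [List.take_take]; congr 1; omega
        have htd : ((values.drop aN).take nn).drop (nn - 1) = [(values.drop aN).getD nr 0] := by
          rw [show nn = nr + 1 by omega]
          simpa using pvTake_drop_singleton (values.drop aN) nr (by omega)
        rw [hclen, hdd, htt, htd, hsl, hget]
        simp [List.append_assoc]
      · -- last, partial group
        have hcond2 : ¬ ((aN : Int) + ((nn : Int) - 1)
            < min ((aN : Int) + (nn : Int)) (values.length : Int)) := by
          rw [lt_min_iff]; omega
        have hnil : PySem.List.pyRange ((aN : Int) + (nn : Int)) (values.length : Int) (nn : Int)
            = [] := pvPyRange_pos_nil h0nn (by omega)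
        rw [hnil] at *
        obtain ⟨a, ha⟩ := hdvd
        have ha' : aN = a * nn := by rw [ha, Nat.mul_comm]
        by_cases hB : values.length - aN = nr
        · -- exactly n_regular values remain: they are all regular
          have hcond1 : (aN : Int) + ((nn : Int) - 1) ≤ (values.length : Int) := by
            omega
          simp only [if_pos hcond1, if_neg hcond2, List.foldl_nil]
          have hmod : values.length % nn = nr := by
            have h1 : values.length = nr + a * nn := by omega
            rw [h1, Nat.add_mul_mod_self_right]
            exact Nat.mod_eq_of_lt (by omega)
          have hcutN : cutN = values.length := by rw [hcut, if_neg (by omega)]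
          rw [hnrc]
          have hsl : PySem.List.slice values (some (aN : Int)) (some ((aN : Int) + ((nr : Nat) : Int)))
              = (values.drop aN).take nr := PySem.List.slice_natCast_add values aN nr
          have htk : (values.drop aN).take nr = values.drop aN :=
            List.take_of_length_le (by omega)
          rw [hsl, htk, pvEsp_tail_keep nr cutN (values.drop aN) aN 0 (by omega) (by omega)]
          simp
        · -- fewer than n_regular values remain: they are dropped
          have hcond1 : ¬ ((aN : Int) + ((nn : Int) - 1) ≤ (values.length : Int)) := by
            omega
          simp only [if_neg hcond1, if_neg hcond2, List.foldl_nil]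
          have hmod : values.length % nn = values.length - aN := by
            have h1 : values.length = (values.length - aN) + a * nn := by omega
            conv_lhs => rw [h1]
            rw [Nat.add_mul_mod_self_right]
            exact Nat.mod_eq_of_lt (by omega)
          have hcutN : cutN = aN := by rw [hcut, if_pos (by omega)]; omega
          rw [pvEsp_tail_drop nr cutN (values.drop aN) aN 0 (by omega) (by omega)]
          simp

-- ===== VERDICT (by name: the statement is the Claim_ definition above) =====
theorem separate_total_energy_bins_spec : Claim_equal_separate_total_energy_bins := by
  intro values n ht _hdom
  unfold Spec_separate_total_energy_bins separate_total_energy_bins separate_total_energy_bins_alt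
  by_cases hg : ht = false ∨ n ≤ 1
  · rw [if_pos hg, if_pos hg]
  · rw [if_neg hg, if_neg hg]
    have hn2 : 2 ≤ n := by
      rcases not_or.mp hg with ⟨h1, h2⟩
      omega
    obtain ⟨nn, rfl⟩ : ∃ m : Nat, n = (m : Int) := ⟨n.toNat, (Int.toNat_of_nonneg (by omega)).symm⟩
    have hnn : 2 ≤ nn := by exact_mod_cast hn2
    have hnr : (nn - 1) + 1 = nn := by omega
    simp only []
    rw [if_neg (show ¬((nn : Int) - 1 = 0) by omega)]
    have hA := pvA_loop values nn (nn - 1)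
      (if values.length % nn < nn - 1 then values.length - values.length % nn else values.length)
      hnr hnn rfl (values.length) 0 [] [] (by omega) (dvd_zero nn) (Nat.zero_le _)
    simp only [Nat.cast_zero, List.nil_append, List.drop_zero] at hA
    rw [hA]
    have hB := pvB_eq_esp nn (nn - 1)
      (if values.length % nn < nn - 1 then values.length - values.length % nn else values.length)
      hnr hnn values 0
    rw [Nat.zero_mod] at hB
    simp only [Nat.cast_zero] at hB
    have hnrc : ((nn : Int) - 1) = ((nn - 1 : Nat) : Int) := by omega
    have hcutc : (if PySem.Int.mod (values.length : Int) (nn : Int) < ((nn - 1 : Nat) : Int)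
          then (values.length : Int) - PySem.Int.mod (values.length : Int) (nn : Int)
          else (values.length : Int))
        = ((if values.length % nn < nn - 1
            then values.length - values.length % nn else values.length : Nat) : Int) := by
      simp only [PySem.Int.mod_natCast]
      have hmle := Nat.mod_le values.length nn
      by_cases hcc : values.length % nn < nn - 1
      · rw [if_pos (show ((values.length % nn : Nat) : Int) < ((nn - 1 : Nat) : Int) by
          exact_mod_cast hcc), if_pos hcc]
        omega
      · rw [if_neg (show ¬ ((values.length % nn : Nat) : Int) < ((nn - 1 : Nat) : Int) by
          exact_mod_cast hcc), if_neg hcc]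
    rw [hnrc, hcutc, ← hB]
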